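-- pv_equiv track=rewrite | github.com/harshsingh94635/TTS-APPLICATION-DEVELOPMENT | utils.py | generate_final_analysis_text
-- ===== SOURCE A (Python) =====
-- def generate_final_analysis_text(articles, company):
--     total = len(articles)
--     if total == 0:
--         return f"No articles found for {company}."
--     pos = sum(1 for a in articles if a["sentiment"] == "Positive")
--     neg = sum(1 for a in articles if a["sentiment"] == "Negative")
--     neu = sum(1 for a in articles if a["sentiment"] == "Neutral")
--     text = (
--         f"{company} ke baare mein humne {total} news articles paye. "
--         f"Positive articles ki sankhya hai {pos}, "
--         f"Negative articles ki sankhya hai {neg}, "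
--         f"aur Neutral articles ki sankhya hai {neu}."
--     )
--     return text
-- ===== SOURCE B (Python) =====
-- def generate_final_analysis_text(articles, company):
--     if not articles:
--         return f"No articles found for {company}."
--     counts = {"Positive": 0, "Negative": 0, "Neutral": 0}
--     for a in articles:
--         s = a["sentiment"]
--         if s in counts:
--             counts[s] += 1
--     return (
--         f"{company} ke baare mein humne {len(articles)} news articles paye. "
--         f"Positive articles ki sankhya hai {counts['Positive']}, "
--         f"Negative articles ki sankhya hai {counts['Negative']}, "
--         f"aur Neutral articles ki sankhya hai {counts['Neutral']}."
--     )
-- ===== Notes on version B (the rewrite author's own statement) =====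
-- stated objective: faster
-- what changed: Replaces three separate generator-expression scans over articles with one pass that maintains a count table keyed by sentiment, from which the three counts are read out.
import Mathlib
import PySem

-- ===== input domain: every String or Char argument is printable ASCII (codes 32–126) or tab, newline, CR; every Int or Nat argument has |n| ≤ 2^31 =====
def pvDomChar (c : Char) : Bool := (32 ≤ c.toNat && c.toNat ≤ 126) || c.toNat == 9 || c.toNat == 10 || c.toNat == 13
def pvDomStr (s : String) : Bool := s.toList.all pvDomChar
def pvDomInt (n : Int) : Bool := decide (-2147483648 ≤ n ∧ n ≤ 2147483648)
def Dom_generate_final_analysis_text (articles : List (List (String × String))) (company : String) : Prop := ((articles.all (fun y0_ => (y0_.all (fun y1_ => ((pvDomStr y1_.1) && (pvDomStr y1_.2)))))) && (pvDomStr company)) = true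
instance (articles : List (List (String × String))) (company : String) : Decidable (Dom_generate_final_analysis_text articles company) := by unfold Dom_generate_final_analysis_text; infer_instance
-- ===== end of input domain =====

-- B replaces A's three generator-expression scans with a single pass maintaining a count
-- table keyed by sentiment (constant-factor win; return value only, no mutation observed).

-- ===== PORT A =====
def generate_final_analysis_text (articles : List (List (String × String))) (company : String) : String :=
  let total : Int := articles.length
  if total == 0 then "No articles found for " ++ company ++ "."
  else
    let pos := articles.foldl (fun acc a => if (a.lookup "sentiment").getD "" == "Positive" then acc + 1 else acc) (0 : Int)
    let neg := articles.foldl (fun acc a => if (a.lookup "sentiment").getD "" == "Negative" then acc + 1 else acc) (0 : Int)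
    let neu := articles.foldl (fun acc a => if (a.lookup "sentiment").getD "" == "Neutral" then acc + 1 else acc) (0 : Int)
    company ++ " ke baare mein humne " ++ PySem.Int.toStr total ++ " news articles paye. " ++
    "Positive articles ki sankhya hai " ++ PySem.Int.toStr pos ++ ", " ++
    "Negative articles ki sankhya hai " ++ PySem.Int.toStr neg ++ ", " ++
    "aur Neutral articles ki sankhya hai " ++ PySem.Int.toStr neu ++ "."

-- ===== PORT B =====
def generate_final_analysis_text_alt (articles : List (List (String × String))) (company : String) : String :=
  if articles.isEmpty then "No articles found for " ++ company ++ "."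
  else
    let init : PySem.Dict String Int :=
      ((PySem.Dict.empty.insert "Positive" 0).insert "Negative" 0).insert "Neutral" 0
    let counts := articles.foldl (fun d a =>
      let s := (a.lookup "sentiment").getD ""
      if d.contains s then d.insert s (d.getD s 0 + 1) else d) init
    company ++ " ke baare mein humne " ++ PySem.Int.toStr (articles.length : Int) ++ " news articles paye. " ++
    "Positive articles ki sankhya hai " ++ PySem.Int.toStr (counts.getD "Positive" 0) ++ ", " ++
    "Negative articles ki sankhya hai " ++ PySem.Int.toStr (counts.getD "Negative" 0) ++ ", " ++
    "aur Neutral articles ki sankhya hai " ++ PySem.Int.toStr (counts.getD "Neutral" 0) ++ "."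

-- ===== PRECONDITION & SPEC =====
-- Pre_ excludes exactly the inputs where a['sentiment'] raises KeyError in both A and B.
def Pre_generate_final_analysis_text (articles : List (List (String × String))) (company : String) : Prop :=
  ∀ a ∈ articles, (a.lookup "sentiment").isSome = true
instance (articles : List (List (String × String))) (company : String) : Decidable (Pre_generate_final_analysis_text articles company) := by unfold Pre_generate_final_analysis_text; infer_instance
def pvWitness_generate_final_analysis_text : (List (List (String × String))) × String :=
  ([[("sentiment", "Positive")], [("sentiment", "Weird")]], "Acme")

def Spec_generate_final_analysis_text (articles : List (List (String × String))) (company : String) (out : String) : Prop := out = generate_final_analysis_text_alt articles company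
instance (articles : List (List (String × String))) (company : String) (out : String) : Decidable (Spec_generate_final_analysis_text articles company out) := by unfold Spec_generate_final_analysis_text; infer_instance

-- ===== CLAIM (what is proved, stated in full; the proofs are below) =====
def Claim_equal_generate_final_analysis_text : Prop := ∀ (articles : List (List (String × String))) (company : String), Dom_generate_final_analysis_text articles company → Pre_generate_final_analysis_text articles company → Spec_generate_final_analysis_text articles company (generate_final_analysis_text articles company)

-- ===== LEMMAS AND PROOFS =====

-- The count-table fold of B reads back, at any key the table contains, its initial value
-- plus the number of articles whose sentiment is that key.
theorem pv_fold_counts (l : List (List (String × String))) (d : PySem.Dict String Int)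
    (k : String) (hk : d.contains k = true) :
    (l.foldl (fun d a =>
      let s := (a.lookup "sentiment").getD ""
      if d.contains s then d.insert s (d.getD s 0 + 1) else d) d).getD k 0
    = d.getD k 0 + (l.countP (fun a => (a.lookup "sentiment").getD "" == k) : Int) := by
  induction l generalizing d with
  | nil => simp
  | cons a t ih =>
    simp only [List.foldl_cons, List.countP_cons]
    by_cases hsk : (a.lookup "sentiment").getD "" = k
    · rw [hsk]
      simp only [hk, if_true]
      rw [ih _ (by simp [PySem.Dict.contains_insert_self])]
      simp [PySem.Dict.getD_insert_self]
      push_cast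
      ring
    · have hne : k ≠ (a.lookup "sentiment").getD "" := fun h => hsk h.symm
      by_cases hc : d.contains ((a.lookup "sentiment").getD "") = true
      · simp only [hc, if_true]
        rw [ih _ (by rw [PySem.Dict.contains_insert]; simp [hk])]
        simp [PySem.Dict.getD_insert, hne, show ((a.lookup "sentiment").getD "" == k) = false from beq_eq_false_iff_ne.mpr hsk]
      · simp only [hc]
        rw [if_neg (by simp [hc]), ih _ hk]
        simp [show ((a.lookup "sentiment").getD "" == k) = false from beq_eq_false_iff_ne.mpr hsk]

-- ===== VERDICT (by name: the statement is the Claim_ definition above) =====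
theorem generate_final_analysis_text_spec : Claim_equal_generate_final_analysis_text := by
  intro articles company _ _
  unfold Spec_generate_final_analysis_text generate_final_analysis_text generate_final_analysis_text_alt
  cases articles with
  | nil => simp
  | cons a t =>
    simp only [List.isEmpty_cons, Bool.false_eq_true, if_false]
    rw [if_neg (by simp; omega)]
    rw [PySem.List.foldl_if_add_one, PySem.List.foldl_if_add_one, PySem.List.foldl_if_add_one]
    rw [pv_fold_counts _ _ _ (by decide), pv_fold_counts _ _ _ (by decide),
        pv_fold_counts _ _ _ (by decide)]
    norm_num [PySem.Dict.getD_insert]
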